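-- pv_equiv track=rewrite | github.com/rohansumant/Codeforces | 1545/A/A.py | process
-- ===== SOURCE A (Python) =====
-- def process(a):
--     d = {}
--     for i in range(len(a)):
--         e = a[i]
--         val = [0,0] if e not in d else d[e]
--         val[i%2] += 1
--         d[e] = val
--     return d
-- ===== SOURCE B (Python) =====
-- def process(a):
--     ev, od = a[::2], a[1::2]
--     ce, co = {}, {}
--     for v in ev:
--         ce[v] = ce.get(v, 0) + 1
--     for v in od:
--         co[v] = co.get(v, 0) + 1
--     return {v: [ce.get(v, 0), co.get(v, 0)] for v in dict.fromkeys(a)}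
-- ===== Notes on version B (the rewrite author's own statement) =====
-- stated objective: alternative
-- what changed: Replaces the single interleaved pass that mutates a per-key [even,odd] pair at index i%2 with two parity slices a[::2]/a[1::2] counted into two separate tally dicts, merged over the first-occurrence-deduplicated keys by a dict comprehension.
import Mathlib
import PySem

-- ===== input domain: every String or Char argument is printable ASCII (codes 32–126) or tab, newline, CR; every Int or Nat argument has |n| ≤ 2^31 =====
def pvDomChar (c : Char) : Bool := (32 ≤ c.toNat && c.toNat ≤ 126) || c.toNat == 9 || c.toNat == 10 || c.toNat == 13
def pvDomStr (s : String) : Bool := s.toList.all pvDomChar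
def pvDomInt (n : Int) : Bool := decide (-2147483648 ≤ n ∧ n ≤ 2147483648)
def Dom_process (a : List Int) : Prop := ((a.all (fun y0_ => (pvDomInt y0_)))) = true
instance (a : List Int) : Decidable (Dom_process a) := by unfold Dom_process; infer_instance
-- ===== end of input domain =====

-- B replaces A's single interleaved pass (mutating a per-key [even,odd] pair at index i%2) by counting
-- the two parity slices a[::2] / a[1::2] per first-occurrence key (idiomatic dict comprehension);
-- return values only, neither implementation mutates `a`.

-- ===== PORT A =====
-- one step of A's loop body, for index i and e = a[i]
def processStep (d : PySem.Dict Int (List Int)) (i e : Int) : PySem.Dict Int (List Int) :=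
  -- val = [0,0] if e not in d else d[e]  (the lookup cannot fail in the else-branch: e is in d there)
  let val := if d.contains e = false then [0, 0] else d.getD e [0, 0]
  -- val[i%2] += 1 ; i % 2 ∈ {0,1} (positive divisor), so .toNat is exact
  let j := (PySem.Int.mod i 2).toNat
  let val := val.set j (val.getD j 0 + 1)
  d.insert e val

def process (a : List Int) : List (Int × List Int) :=
  ((PySem.List.pyRange 0 (PySem.List.len a)).foldl
      (fun d i => processStep d i (PySem.List.pyGetD a i 0))  -- e = a[i]; i ∈ range(len(a)) is in range
      PySem.Dict.empty).items

-- ===== PORT B =====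
def process_alt (a : List Int) : List (Int × List Int) :=
  let ev := (PySem.List.slice? a none none 2).getD []        -- a[::2]; step ≠ 0, never raises
  let od := (PySem.List.slice? a (some 1) none 2).getD []    -- a[1::2]
  -- ce[v] = ce.get(v, 0) + 1  (and the same for co)
  let ce := ev.foldl (fun d v => d.insert v (d.getD v 0 + 1)) PySem.Dict.empty
  let co := od.foldl (fun d v => d.insert v (d.getD v 0 + 1)) PySem.Dict.empty
  (PySem.List.dedup a).map (fun v => (v, [ce.getD v 0, co.getD v 0]))

-- ===== PRECONDITION & SPEC =====
def Spec_process (a : List Int) (out : List (Int × List Int)) : Prop := out = process_alt a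
instance (a : List Int) (out : List (Int × List Int)) : Decidable (Spec_process a out) := by unfold Spec_process; infer_instance

-- ===== CLAIM (what is proved, stated in full; the proofs are below) =====
def Claim_equal_process : Prop := ∀ (a : List Int), Dom_process a → Spec_process a (process a)

-- ===== LEMMAS AND PROOFS =====

def evens : List Int → List Int
  | [] => []
  | [x] => [x]
  | x :: _ :: t => x :: evens t

theorem evens_cons (x : Int) (t : List Int) : evens (x :: t) = x :: evens t.tail := by
  cases t <;> simp [evens]

theorem evensAux : (a : List Int) → (List.range ((a.length+1)/2)).filterMap (fun (k:Nat) => a[2*k]?) = evens a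
  | [] => by simp [evens]
  | [x] => by simp [evens]
  | x :: y :: t => by
    have ih := evensAux t
    have h2 : ((x :: y :: t).length + 1)/2 = (t.length+1)/2 + 1 := by simp; omega
    rw [h2, List.range_succ_eq_map]
    simp only [List.filterMap_cons, List.filterMap_map]
    have hf : ∀ k : Nat, ((fun (k:Nat) => (x :: y :: t)[2*k]?) ∘ Nat.succ) k = t[2*k]? := by
      intro k
      have : 2 * Nat.succ k = 2*k + 1 + 1 := by omega
      simp [this]
    rw [List.filterMap_congr (fun k _ => hf k), ih]
    simp [evens]

theorem countAux (a : List Int) :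
    (if 0 < a.length then (((a.length:Int) + 2 - 1) / 2).toNat else 0) = (a.length + 1) / 2 := by
  split <;> omega

theorem slice?_step_two (a : List Int) :
    PySem.List.slice? a none none 2 = some (evens a) := by
  rw [← evensAux a]
  simp only [PySem.List.slice?, PySem.List.sliceIndices]
  norm_num
  rw [countAux]
  apply List.filterMap_congr
  intro x _
  congr 1

theorem slice?_one_step_two (a : List Int) :
    PySem.List.slice? a (some 1) none 2 = some (evens a.tail) := by
  cases a with
  | nil => simp [PySem.List.slice?, PySem.List.sliceIndices, evens]
  | cons x t =>
    rw [show (x :: t).tail = t from rfl, ← evensAux t]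
    simp only [PySem.List.slice?, PySem.List.sliceIndices]
    norm_num
    rw [countAux]
    apply List.filterMap_congr
    intro k _
    have h1 : ((1:Int) + 2 * (k:Int)).toNat = 2*k + 1 := by omega
    rw [h1]
    simp

def cE (s : Int) (xs : List Int) (v : Int) : Int :=
  if s % 2 = 0 then ((evens xs).count v : Int) else ((evens xs.tail).count v : Int)
def cO (s : Int) (xs : List Int) (v : Int) : Int :=
  if s % 2 = 0 then ((evens xs.tail).count v : Int) else ((evens xs).count v : Int)

def bump (s : Int) (v : List Int) : List Int :=
  v.set (s % 2).toNat (v.getD (s % 2).toNat 0 + 1)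

theorem processStep_eq (d : PySem.Dict Int (List Int)) (i e : Int) :
    processStep d i e = d.insert e (bump i (if d.contains e = false then [0,0] else d.getD e [0,0])) := by
  simp [processStep, bump]

theorem bump_pair (s n0 n1 : Int) :
    bump s [n0, n1] = if s % 2 = 0 then [n0 + 1, n1] else [n0, n1 + 1] := by
  have : s % 2 = 0 ∨ s % 2 = 1 := by omega
  rcases this with h | h <;> simp [bump, h]

theorem bump_len (s : Int) (v : List Int) : (bump s v).length = v.length := by
  simp [bump]

theorem cE_cons (s e : Int) (t : List Int) (v : Int) :
    cE s (e :: t) v = (if s % 2 = 0 ∧ v = e then 1 else 0) + cE (s+1) t v := by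
  have hpar : (s+1) % 2 = 0 ↔ ¬ (s % 2 = 0) := by omega
  by_cases h : s % 2 = 0 <;>
    by_cases hv : v = e <;>
    simp [cE, evens_cons, h, hpar, hv, List.count_cons] <;> omega

theorem cO_cons (s e : Int) (t : List Int) (v : Int) :
    cO s (e :: t) v = (if ¬ s % 2 = 0 ∧ v = e then 1 else 0) + cO (s+1) t v := by
  have hpar : (s+1) % 2 = 0 ↔ ¬ (s % 2 = 0) := by omega
  by_cases h : s % 2 = 0 <;>
    by_cases hv : v = e <;>
    simp [cO, evens_cons, h, hpar, hv, List.count_cons] <;> omega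

theorem cE_nil (s v : Int) : cE s [] v = 0 := by simp [cE, evens]
theorem cO_nil (s v : Int) : cO s [] v = 0 := by simp [cO, evens]

theorem find_of_nodup (l : List (Int × List Int)) (p : Int × List Int)
    (hnd : (l.map Prod.fst).Nodup) (hp : p ∈ l) :
    List.find? (fun q => q.1 == p.1) l = some p := by
  induction l with
  | nil => cases hp
  | cons q l ih =>
    rcases List.mem_cons.mp hp with rfl | hp'
    · simp
    · have hmem : p.1 ∈ l.map Prod.fst := List.mem_map.mpr ⟨p, hp', rfl⟩
      have hne : q.1 ≠ p.1 := fun h => (List.nodup_cons.mp hnd).1 (h ▸ hmem)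
      rw [List.find?_cons_of_neg (by simpa using hne)]
      exact ih (List.nodup_cons.mp hnd).2 hp'

theorem getD_of_mem (d : PySem.Dict Int (List Int)) (p : Int × List Int)
    (hnd : (d.items.map Prod.fst).Nodup) (hp : p ∈ d.items) (dflt : List Int) :
    d.getD p.1 dflt = p.2 := by
  simp [PySem.Dict.getD, PySem.Dict.get?, find_of_nodup _ _ hnd hp]

theorem exists_of_contains (d : PySem.Dict Int (List Int)) (e : Int)
    (hc : d.contains e = true) : ∃ p ∈ d.items, p.1 = e := by
  rcases List.any_eq_true.mp hc with ⟨p, hp, hb⟩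
  exact ⟨p, hp, by simpa using hb⟩

theorem not_mem_keys_of_not_contains (d : PySem.Dict Int (List Int)) (e : Int)
    (hc : d.contains e = false) : e ∉ d.items.map Prod.fst := by
  intro hmem
  rcases List.mem_map.mp hmem with ⟨p, hp, hpe⟩
  have := List.any_eq_false.mp hc p hp
  simp [hpe] at this

theorem pair2 (v : List Int) (h : v.length = 2) : [v.getD 0 0, v.getD 1 0] = v := by
  match v, h with
  | [n0, n1], _ => simp

theorem main_loop (xs : List Int) : ∀ (s : Int) (d : PySem.Dict Int (List Int)),
    (d.items.map Prod.fst).Nodup → (∀ p ∈ d.items, p.2.length = 2) →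
    ((PySem.List.enumerate xs s).foldl (fun d p => processStep d p.1 p.2) d).items
    = d.items.map (fun p => (p.1, [p.2.getD 0 0 + cE s xs p.1, p.2.getD 1 0 + cO s xs p.1]))
      ++ ((PySem.List.dedup xs).filter (fun v => d.contains v = false)).map
           (fun v => (v, [cE s xs v, cO s xs v])) := by
  induction xs with
  | nil =>
    intro s d hnd h2
    simp only [PySem.List.enumerate, List.foldl_nil, PySem.List.dedup_eq_ofList]
    rw [show PySem.Set.ofList ([] : List Int) = [] from rfl]
    simp only [List.filter_nil, List.map_nil, List.append_nil, cE_nil, cO_nil]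
    rw [List.map_congr_left (fun p hp => by
      rw [show p.2.getD 0 0 + 0 = p.2.getD 0 0 by ring, show p.2.getD 1 0 + 0 = p.2.getD 1 0 by ring,
          pair2 p.2 (h2 p hp)])]
    simp
  | cons e t ih =>
    intro s d hnd h2
    rw [PySem.List.enumerate_cons, List.foldl_cons]
    cases hc : d.contains e with
    | true =>
      obtain ⟨q, hq, hqe⟩ := exists_of_contains d e hc
      have hval : d.getD e [0,0] = q.2 := by rw [← hqe]; exact getD_of_mem d q hnd hq _
      have hstep : processStep d s e = d.insert e (bump s q.2) := by
        rw [processStep_eq, hc, hval]; simp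
      have hnd' : (((d.insert e (bump s q.2)).items).map Prod.fst).Nodup := by
        have hk := PySem.Dict.keys_insert_of_contains d (bump s q.2) hc
        simp only [PySem.Dict.keys] at hk
        simpa [hk] using hnd
      have h2' : ∀ p ∈ (d.insert e (bump s q.2)).items, p.2.length = 2 := by
        intro p hp
        rw [PySem.Dict.items_insert_of_contains d _ hc] at hp
        rcases List.mem_map.mp hp with ⟨r, hr, hrp⟩
        by_cases hre : (r.1 == e) = true
        · rw [← hrp]; simp only [hre, if_true]
          rw [bump_len]; exact h2 q hq
        · rw [← hrp]; simp [hre]; exact h2 r hr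
      rw [hstep, ih (s+1) _ hnd' h2', PySem.Dict.items_insert_of_contains d _ hc]
      congr 1
      · -- existing entries
        rw [List.map_map]
        apply List.map_congr_left
        intro p hp
        by_cases hpe : p.1 = e
        · have hq2 : q.2 = p.2 := by
            rw [← getD_of_mem d q hnd hq [0,0], ← getD_of_mem d p hnd hp [0,0], hqe, hpe]
          obtain ⟨n0, n1, hpn⟩ : ∃ n0 n1, p.2 = [n0, n1] := by
            have := h2 p hp
            match p, this with
            | (k, [a0, a1]), _ => exact ⟨a0, a1, rfl⟩
          simp only [Function.comp, hpe, beq_self_eq_true, if_true]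
          rw [cE_cons, cO_cons, hq2, hpn]
          by_cases hs : s % 2 = 0 <;>
            simp [bump_pair, hs] <;> ring
        · simp only [Function.comp, show (p.1 == e) = false by simpa using hpe, Bool.false_eq_true,
            if_false, cE_cons, cO_cons, hpe, and_false, if_false, zero_add]
      · -- new entries
        have hcontains' : ∀ v, (d.insert e (bump s q.2)).contains v = ((v == e) || d.contains v) :=
          fun v => PySem.Dict.contains_insert d e v _
        simp only [PySem.List.dedup_eq_ofList, PySem.Set.ofList_cons, PySem.Set.discard,
          List.filter_cons, List.filter_filter, hc]
        rw [if_neg (by simp)]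
        rw [List.filter_congr (l := PySem.Set.ofList t)
          (fun v _ => show (decide ((d.insert e (bump s q.2)).contains v = false))
              = (decide (d.contains v = false) && !(v == e)) from by
            rw [hcontains' v]; by_cases hv : v = e <;> simp [hv])]
        apply List.map_congr_left
        intro v hv
        have hvne : v ≠ e := by
          have := List.mem_filter.mp hv
          simp at this
          exact this.2.2
        rw [cE_cons, cO_cons]
        simp [hvne]
    | false =>
      have hstep : processStep d s e = d.insert e (bump s [0,0]) := by
        rw [processStep_eq, hc]; simp
      have hitems : (d.insert e (bump s [0,0])).items = d.items ++ [(e, bump s [0,0])] :=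
        PySem.Dict.items_insert_of_not_contains d _ hc
      have hem : e ∉ d.items.map Prod.fst := not_mem_keys_of_not_contains d e hc
      have hnd' : (((d.insert e (bump s [0,0])).items).map Prod.fst).Nodup := by
        rw [hitems, List.map_append]
        refine List.Nodup.append hnd (by simp) ?_
        intro x hx hy
        simp at hy
        exact hem (hy ▸ hx)
      have h2' : ∀ p ∈ (d.insert e (bump s [0,0])).items, p.2.length = 2 := by
        intro p hp
        rw [hitems] at hp
        rcases List.mem_append.mp hp with h | h
        · exact h2 p h
        · simp at h; simp [h, bump_len]
      have hcontains' : ∀ v : Int, (d.insert e (bump s [0,0])).contains v = ((v == e) || d.contains v) :=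
        fun v => PySem.Dict.contains_insert d e v _
      rw [hstep, ih (s+1) _ hnd' h2', hitems]
      simp only [PySem.List.dedup_eq_ofList, PySem.Set.ofList_cons, PySem.Set.discard,
        List.filter_cons, List.filter_filter, List.map_append, List.append_assoc]
      rw [if_pos (by simp [hc])]
      congr 1
      · apply List.map_congr_left
        intro p hp
        have hpe : p.1 ≠ e := by
          intro h
          exact hem (List.mem_map.mpr ⟨p, hp, h⟩)
        rw [cE_cons, cO_cons]
        simp [hpe]
      · rw [List.filter_congr (l := PySem.Set.ofList t)
          (fun v _ => show (decide ((d.insert e (bump s [0,0])).contains v = false))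
              = (decide (d.contains v = false) && !(v == e)) from by
            rw [hcontains' v]; by_cases hv : v = e <;> simp [hv, hc])]
        simp only [List.map_cons, List.map_nil, List.cons_append, List.nil_append]
        congr 1
        · rw [cE_cons, cO_cons]
          by_cases hs : s % 2 = 0 <;> simp [bump_pair, hs]
        · apply List.map_congr_left
          intro v hv
          have hvne : v ≠ e := by
            have := List.mem_filter.mp hv
            simp at this
            exact this.2.2
          rw [cE_cons, cO_cons]
          simp [hvne]

theorem counter_getD (l : List Int) (v : Int) :
    (l.foldl (fun d v => d.insert v (d.getD v 0 + 1)) PySem.Dict.empty).getD v 0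
      = (l.count v : Int) := by
  have h := PySem.Dict.getD_foldl_modify_add_one l PySem.Dict.empty v
  simp only [PySem.Dict.modify] at h
  rw [h]
  simp [PySem.Dict.getD, PySem.Dict.get?, PySem.Dict.empty]

-- ===== VERDICT (by name: the statement is the Claim_ definition above) =====
theorem process_spec : Claim_equal_process := by
  intro a _
  show process a = process_alt a
  unfold process process_alt
  rw [slice?_step_two, slice?_one_step_two]
  have hb : (List.foldl (fun d p => processStep d p.1 p.2) PySem.Dict.empty
      (PySem.List.enumerate a 0)).items
      = ((PySem.List.pyRange 0 (PySem.List.len a)).foldl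
          (fun d i => processStep d i (PySem.List.pyGetD a i 0)) PySem.Dict.empty).items := by
    rw [PySem.List.enumerate_eq_map_pyRange a 0, List.foldl_map]
  rw [← hb, main_loop a 0 PySem.Dict.empty (by simp [PySem.Dict.empty]) (by simp [PySem.Dict.empty])]
  simp [PySem.Dict.empty, cE, cO, PySem.Dict.contains]
  intro v _
  exact ⟨(counter_getD _ v).symm, (counter_getD _ v).symm⟩
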